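-- pv_equiv track=rewrite | github.com/jls83/reconciliation | reconciliation.py | reconcile_positions_3
-- ===== SOURCE A (Python) =====
-- def get_symbol_value_reconcile(symbol, position_dict):
--     try:
--         val = position_dict[symbol]
--     except KeyError:
--         val = 0
--     return val
--
-- def reconcile_positions_3(pos_dict_1, pos_dict_2):
--     res = {}
--
--     all_keys = list(pos_dict_1.keys()) + list(pos_dict_2.keys())
--
--     for symbol in all_keys:
--         d0_val = get_symbol_value_reconcile(symbol, pos_dict_1)
--         d1_val = get_symbol_value_reconcile(symbol, pos_dict_2)
--         diff = d1_val - d0_val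
--         if diff != 0:
--             res[symbol] = diff
--
--     return res
-- ===== SOURCE B (Python) =====
-- def reconcile_positions_3(pos_dict_1, pos_dict_2):
--     # Signed-sum accumulator: negate the first book, add the second on top,
--     # then filter out the zero lines. No per-key lookups across the two dicts.
--     acc = {symbol: -val for symbol, val in pos_dict_1.items()}
--     for symbol, val in pos_dict_2.items():
--         acc[symbol] = acc.get(symbol, 0) + val
--     return {symbol: diff for symbol, diff in acc.items() if diff != 0}
-- ===== Notes on version B (the rewrite author's own statement) =====
-- stated objective: alternative
-- what changed: A walks the concatenated key lists and for every key does a try/except lookup into BOTH dicts; B never looks across dicts per key: it builds one signed-sum accumulator (negated copy of dict 1, then adds dict 2's entries into it) and filters the nonzero entries at the end.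
import Mathlib
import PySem

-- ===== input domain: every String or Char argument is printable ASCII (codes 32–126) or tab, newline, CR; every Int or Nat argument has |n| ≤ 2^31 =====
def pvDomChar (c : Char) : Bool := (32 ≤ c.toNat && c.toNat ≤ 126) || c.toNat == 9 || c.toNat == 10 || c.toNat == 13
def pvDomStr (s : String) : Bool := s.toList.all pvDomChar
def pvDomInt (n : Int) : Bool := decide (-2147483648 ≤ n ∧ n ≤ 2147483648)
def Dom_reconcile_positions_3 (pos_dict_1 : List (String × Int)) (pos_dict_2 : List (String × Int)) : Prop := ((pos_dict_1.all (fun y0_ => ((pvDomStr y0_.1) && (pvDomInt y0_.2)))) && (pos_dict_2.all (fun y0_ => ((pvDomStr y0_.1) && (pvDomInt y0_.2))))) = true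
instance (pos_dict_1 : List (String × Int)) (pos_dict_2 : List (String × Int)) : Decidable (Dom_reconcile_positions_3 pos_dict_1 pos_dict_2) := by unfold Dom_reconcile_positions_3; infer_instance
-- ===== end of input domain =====

-- B replaces A's per-key double-dict lookups with a signed-sum accumulator (negated copy of
-- dict 1, dict 2 added in, zeros filtered at the end); objective: alternative, same asymptotic cost.


-- ===== PORT A =====
def get_symbol_value_reconcile (symbol : String) (position_dict : List (String × Int)) : Int :=
  match (PySem.Dict.mk position_dict).get? symbol with
  | some val => val
  | none => 0

def reconcile_positions_3 (pos_dict_1 : List (String × Int)) (pos_dict_2 : List (String × Int)) : List (String × Int) :=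
  let all_keys := (PySem.Dict.mk pos_dict_1).keys ++ (PySem.Dict.mk pos_dict_2).keys
  (all_keys.foldl (fun res symbol =>
      let d0_val := get_symbol_value_reconcile symbol pos_dict_1
      let d1_val := get_symbol_value_reconcile symbol pos_dict_2
      let diff := d1_val - d0_val
      if diff ≠ 0 then res.insert symbol diff else res)
    (PySem.Dict.empty : PySem.Dict String Int)).items

-- ===== PORT B =====
def reconcile_positions_3_alt (pos_dict_1 : List (String × Int)) (pos_dict_2 : List (String × Int)) : List (String × Int) :=
  -- {symbol: -val for symbol, val in pos_dict_1.items()}  (a dict comprehension is a fold of inserts)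
  let acc := pos_dict_1.foldl (fun acc kv => acc.insert kv.1 (-kv.2)) (PySem.Dict.empty : PySem.Dict String Int)
  -- for symbol, val in pos_dict_2.items(): acc[symbol] = acc.get(symbol, 0) + val
  let acc2 := pos_dict_2.foldl (fun acc kv => acc.insert kv.1 (acc.getD kv.1 0 + kv.2)) acc
  -- {symbol: diff for symbol, diff in acc.items() if diff != 0}: acc2's keys are distinct,
  -- so the comprehension is exactly a filter of its items
  acc2.items.filter (fun kv => kv.2 ≠ 0)

-- ===== PRECONDITION & SPEC =====
-- The Python arguments are dicts, whose keys are necessarily distinct; Pre_ states exactly that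
-- for their association-list representations (an assoc list with a repeated key denotes no dict).
def Pre_reconcile_positions_3 (pos_dict_1 : List (String × Int)) (pos_dict_2 : List (String × Int)) : Prop :=
  (pos_dict_1.map Prod.fst).Nodup ∧ (pos_dict_2.map Prod.fst).Nodup
instance (pos_dict_1 : List (String × Int)) (pos_dict_2 : List (String × Int)) : Decidable (Pre_reconcile_positions_3 pos_dict_1 pos_dict_2) := by unfold Pre_reconcile_positions_3; infer_instance

def pvWitness_reconcile_positions_3 : (List (String × Int)) × (List (String × Int)) :=
  ([("a", 1)], [("a", 2), ("b", 0)])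

def Spec_reconcile_positions_3 (pos_dict_1 : List (String × Int)) (pos_dict_2 : List (String × Int)) (out : List (String × Int)) : Prop := out = reconcile_positions_3_alt pos_dict_1 pos_dict_2
instance (pos_dict_1 : List (String × Int)) (pos_dict_2 : List (String × Int)) (out : List (String × Int)) : Decidable (Spec_reconcile_positions_3 pos_dict_1 pos_dict_2 out) := by unfold Spec_reconcile_positions_3; infer_instance

-- ===== CLAIM (what is proved, stated in full; the proofs are below) =====
def Claim_equal_reconcile_positions_3 : Prop := ∀ (pos_dict_1 : List (String × Int)) (pos_dict_2 : List (String × Int)), Dom_reconcile_positions_3 pos_dict_1 pos_dict_2 → Pre_reconcile_positions_3 pos_dict_1 pos_dict_2 → Spec_reconcile_positions_3 pos_dict_1 pos_dict_2 (reconcile_positions_3 pos_dict_1 pos_dict_2)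

-- ===== LEMMAS AND PROOFS =====

theorem gsv_eq (s : String) (d : List (String × Int)) :
    get_symbol_value_reconcile s d = (PySem.Dict.mk d).getD s 0 := by
  unfold get_symbol_value_reconcile PySem.Dict.getD
  cases (PySem.Dict.mk d).get? s <;> rfl

theorem get?_mk_of_mem {l : List (String × Int)} {kv : String × Int}
    (hnd : (l.map Prod.fst).Nodup) (h : kv ∈ l) :
    (PySem.Dict.mk l).get? kv.1 = some kv.2 := by
  induction l with
  | nil => simp at h
  | cons p t ih =>
    simp only [List.map_cons, List.nodup_cons] at hnd
    rcases List.mem_cons.mp h with h | h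
    · subst h; simp [PySem.Dict.get?, List.find?]
    · have hne : ¬ (p.1 == kv.1) = true := by
        simp only [beq_iff_eq]
        intro he; exact hnd.1 (he ▸ (List.mem_map_of_mem h))
      simp [PySem.Dict.get?, List.find?, hne]
      have := ih hnd.2 h
      simpa [PySem.Dict.get?] using this

theorem mem_of_get?_mk {l : List (String × Int)} {k : String} {w : Int}
    (h : (PySem.Dict.mk l).get? k = some w) : (k, w) ∈ l := by
  simp only [PySem.Dict.get?, Option.map_eq_some_iff] at h
  obtain ⟨p, hp, hw⟩ := h
  have hm := List.mem_of_find?_eq_some hp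
  have hk := List.find?_some hp
  simp only [beq_iff_eq] at hk
  cases p; simp_all

theorem contains_iff_get?_isSome (d : PySem.Dict String Int) (k : String) :
    d.contains k = true ↔ (d.get? k).isSome = true := by
  simp [PySem.Dict.contains, PySem.Dict.get?, List.any_eq_true, List.find?_isSome]

theorem insert_self_of_get? {d : PySem.Dict String Int} {k : String} {v : Int}
    (hnd : d.keys.Nodup) (h : d.get? k = some v) : d.insert k v = d := by
  have hc : d.contains k = true := by
    simp only [PySem.Dict.get?, Option.map_eq_some_iff] at h
    obtain ⟨p, hp, _⟩ := h
    simp only [PySem.Dict.contains, List.any_eq_true]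
    have hps := List.find?_some hp
    exact ⟨p, List.mem_of_find?_eq_some hp, hps⟩
  simp only [PySem.Dict.insert, hc, if_pos]
  apply PySem.Dict.ext
  obtain ⟨items⟩ := d
  simp only [PySem.Dict.get?] at h
  simp only [PySem.Dict.keys] at hnd
  clear hc
  induction items with
  | nil => simp at h
  | cons p t ih =>
    simp only [List.map_cons, List.nodup_cons] at hnd
    by_cases hp : (p.1 == k) = true
    · have hk : p.1 = k := beq_iff_eq.mp hp
      simp only [List.find?, hp, Option.map_some] at h
      have hpv : p = (k, v) := by cases p; simp_all
      subst hpv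
      simp only [List.map_cons, hp, if_pos]
      refine congrArg (List.cons (k, v)) ?_
      conv_rhs => rw [← List.map_id t]
      apply List.map_congr_left
      intro q hq
      by_cases hqk : (q.1 == k) = true
      · have hqm : q.1 ∈ List.map (fun x => x.1) t := List.mem_map_of_mem hq
        rw [beq_iff_eq.mp hqk] at hqm
        exact absurd hqm (by simpa using hnd.1)
      · simp [hqk]
    · simp only [List.find?, hp] at h
      simp only [List.map_cons, if_neg hp]
      exact congrArg (List.cons p) (ih hnd.2 h)

-- A's two passes, a conditional-insert loop whose fresh distinct keys append filtered entries
theorem foldl_ins_if_fresh (l : List (String × Int)) (f : String × Int → Int)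
    (acc : PySem.Dict String Int)
    (hnd : (l.map Prod.fst).Nodup) (hfresh : ∀ kv ∈ l, acc.contains kv.1 = false) :
    (l.foldl (fun res kv => if f kv ≠ 0 then res.insert kv.1 (f kv) else res) acc).items
      = acc.items ++ (l.map (fun kv => (kv.1, f kv))).filter (fun kv => kv.2 ≠ 0) := by
  induction l generalizing acc with
  | nil => simp
  | cons p t ih =>
    simp only [List.map_cons, List.nodup_cons] at hnd
    simp only [List.foldl_cons, List.map_cons, List.filter_cons]
    by_cases hf : f p ≠ 0
    · rw [if_pos hf]
      have hpc : acc.contains p.1 = false := hfresh p List.mem_cons_self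
      have hfresh' : ∀ kv ∈ t, (acc.insert p.1 (f p)).contains kv.1 = false := by
        intro kv hkv
        rw [PySem.Dict.contains_insert]
        have hne : (kv.1 == p.1) = false := by
          simp only [beq_eq_false_iff_ne, ne_eq]
          intro he; exact hnd.1 (he ▸ List.mem_map_of_mem hkv)
        simp [hne, hfresh kv (List.mem_cons_of_mem _ hkv)]
      rw [ih _ hnd.2 hfresh', PySem.Dict.items_insert_of_not_contains _ _ hpc]
      simp [hf, List.append_assoc]
    · rw [if_neg hf]
      simp only [ne_eq, not_not] at hf
      rw [ih _ hnd.2 (fun kv hkv => hfresh kv (List.mem_cons_of_mem _ hkv))]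
      simp [hf]

-- A's second pass over d2's items: shared keys re-insert their existing value (no-op),
-- d2-only keys append their value when nonzero
theorem Aphase2_items (d1 : List (String × Int)) (t : List (String × Int))
    (acc : PySem.Dict String Int)
    (hnd : (t.map Prod.fst).Nodup) (hka : acc.keys.Nodup)
    (hinv : ∀ kv ∈ t, ∀ w : Int, (PySem.Dict.mk d1).get? kv.1 = some w →
        kv.2 - w ≠ 0 → acc.get? kv.1 = some (kv.2 - w))
    (hout : ∀ kv ∈ t, (PySem.Dict.mk d1).contains kv.1 = false → acc.contains kv.1 = false) :
    (t.foldl (fun res kv =>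
        if kv.2 - (PySem.Dict.mk d1).getD kv.1 0 ≠ 0
        then res.insert kv.1 (kv.2 - (PySem.Dict.mk d1).getD kv.1 0) else res) acc).items
      = acc.items ++ t.filter (fun kv => ¬ (PySem.Dict.mk d1).contains kv.1 ∧ kv.2 ≠ 0) := by
  induction t generalizing acc with
  | nil => simp
  | cons p t ih =>
    simp only [List.map_cons, List.nodup_cons] at hnd
    simp only [List.foldl_cons, List.filter_cons]
    by_cases hc : (PySem.Dict.mk d1).contains p.1 = true
    · obtain ⟨w, hw⟩ := Option.isSome_iff_exists.mp ((contains_iff_get?_isSome _ _).mp hc)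
      have hg : (PySem.Dict.mk d1).getD p.1 0 = w := by simp [PySem.Dict.getD, hw]
      rw [hg]
      have hdrop : (decide (¬(PySem.Dict.mk d1).contains p.1 = true ∧ p.2 ≠ 0)) = false := by
        simp [hc]
      rw [hdrop]
      by_cases hd : p.2 - w ≠ 0
      · rw [if_pos hd, insert_self_of_get? hka (hinv p List.mem_cons_self w hw hd)]
        exact ih acc hnd.2 hka (fun kv hkv => hinv kv (List.mem_cons_of_mem _ hkv))
          (fun kv hkv => hout kv (List.mem_cons_of_mem _ hkv))
      · rw [if_neg hd]
        exact ih acc hnd.2 hka (fun kv hkv => hinv kv (List.mem_cons_of_mem _ hkv))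
          (fun kv hkv => hout kv (List.mem_cons_of_mem _ hkv))
    · have hcf : (PySem.Dict.mk d1).contains p.1 = false := by
        cases h : (PySem.Dict.mk d1).contains p.1
        · rfl
        · exact absurd h hc
      have hw : (PySem.Dict.mk d1).get? p.1 = none := by
        cases ho : (PySem.Dict.mk d1).get? p.1 with
        | none => rfl
        | some w => exact absurd ((contains_iff_get?_isSome _ _).mpr (by simp [ho])) hc
      have hg : (PySem.Dict.mk d1).getD p.1 0 = 0 := by simp [PySem.Dict.getD, hw]
      rw [hg, sub_zero]
      by_cases hz : p.2 ≠ 0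
      · rw [if_pos hz]
        have hpacc : acc.contains p.1 = false := hout p List.mem_cons_self hcf
        have hka' : (acc.insert p.1 p.2).keys.Nodup := PySem.Dict.nodup_keys_insert _ _ _ hka
        have hinv' : ∀ kv ∈ t, ∀ w : Int, (PySem.Dict.mk d1).get? kv.1 = some w →
            kv.2 - w ≠ 0 → (acc.insert p.1 p.2).get? kv.1 = some (kv.2 - w) := by
          intro kv hkv w hw2 hdw
          have hne : kv.1 ≠ p.1 := by
            intro he
            rw [he, hw] at hw2; cases hw2
          rw [PySem.Dict.get?_insert_of_ne _ _ hne]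
          exact hinv kv (List.mem_cons_of_mem _ hkv) w hw2 hdw
        have hout' : ∀ kv ∈ t, (PySem.Dict.mk d1).contains kv.1 = false →
            (acc.insert p.1 p.2).contains kv.1 = false := by
          intro kv hkv hkvf
          rw [PySem.Dict.contains_insert]
          have hne : (kv.1 == p.1) = false := by
            simp only [beq_eq_false_iff_ne, ne_eq]
            intro he; exact hnd.1 (he ▸ List.mem_map_of_mem hkv)
          simp [hne, hout kv (List.mem_cons_of_mem _ hkv) hkvf]
        rw [ih _ hnd.2 hka' hinv' hout',
          PySem.Dict.items_insert_of_not_contains _ _ hpacc]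
        simp [hcf, hz, List.append_assoc]
      · rw [if_neg hz]
        simp only [ne_eq, not_not] at hz
        rw [ih acc hnd.2 hka (fun kv hkv => hinv kv (List.mem_cons_of_mem _ hkv))
          (fun kv hkv => hout kv (List.mem_cons_of_mem _ hkv))]
        simp [hz]

-- B's second pass: every existing entry gains that key's dict-2 value, dict-2-only keys append
theorem Bphase2_items (t : List (String × Int)) (acc : PySem.Dict String Int)
    (hnd : (t.map Prod.fst).Nodup) (hka : acc.keys.Nodup) :
    (t.foldl (fun res kv => res.insert kv.1 (res.getD kv.1 0 + kv.2)) acc).items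
      = acc.items.map (fun kv => (kv.1, kv.2 + (PySem.Dict.mk t).getD kv.1 0))
        ++ (t.filter (fun kv => ¬ acc.contains kv.1 = true)).map (fun kv => (kv.1, kv.2)) := by
  induction t generalizing acc with
  | nil =>
    simp [PySem.Dict.getD, PySem.Dict.get?]
  | cons p t ih =>
    obtain ⟨k0, v0⟩ := p
    simp only [List.map_cons, List.nodup_cons] at hnd
    have hTp : (PySem.Dict.mk ((k0, v0) :: t)).getD k0 0 = v0 := by
      simp [PySem.Dict.getD, PySem.Dict.get?_mk_cons]
    have hTne : ∀ k, k ≠ k0 → (PySem.Dict.mk ((k0, v0) :: t)).getD k 0 = (PySem.Dict.mk t).getD k 0 := by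
      intro k hk
      have hb : (k0 == k) = false := by
        simp only [beq_eq_false_iff_ne, ne_eq]
        exact fun h => hk h.symm
      simp [PySem.Dict.getD, PySem.Dict.get?_mk_cons, hb]
    have hTp' : (PySem.Dict.mk t).getD k0 0 = 0 := by
      have hn : (PySem.Dict.mk t).get? k0 = none := by
        cases ho : (PySem.Dict.mk t).get? k0 with
        | none => rfl
        | some w =>
          exact absurd (List.mem_map_of_mem (f := Prod.fst) (mem_of_get?_mk ho)) hnd.1
      simp [PySem.Dict.getD, hn]
    simp only [List.foldl_cons, List.filter_cons]
    by_cases hc : acc.contains k0 = true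
    · -- overwrite in place
      have hka' : (acc.insert k0 (acc.getD k0 0 + v0)).keys.Nodup :=
        PySem.Dict.nodup_keys_insert _ _ _ hka
      rw [ih _ hnd.2 hka']
      have hdrop : (decide (¬ acc.contains k0 = true)) = false := by simp [hc]
      rw [hdrop]
      simp only [Bool.false_eq_true, if_false]
      congr 1
      · -- the mapped items agree entrywise
        rw [PySem.Dict.items_insert_of_contains _ _ hc, List.map_map]
        apply List.map_congr_left
        intro q hq
        by_cases hqp : (q.1 == k0) = true
        · have hqk : q.1 = k0 := beq_iff_eq.mp hqp
          have hqv : acc.getD q.1 0 = q.2 := PySem.Dict.getD_of_mem_items _ hq hka 0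
          simp only [Function.comp, hqp, if_pos]
          rw [hqk] at hqv
          rw [hTp', hqv, hqk, hTp]
          simp
        · have hqk : q.1 ≠ k0 := by simpa using hqp
          simp only [Function.comp, hqp, Bool.false_eq_true, if_false]
          rw [hTne q.1 hqk]
      · -- the filtered tail agrees: the overwritten dict contains the same keys
        apply congrArg
        apply List.filter_congr
        intro kv hkv
        have hne : (kv.1 == k0) = false := by
          simp only [beq_eq_false_iff_ne, ne_eq]
          intro he; exact hnd.1 (he ▸ List.mem_map_of_mem hkv)
        simp [PySem.Dict.contains_insert, hne]
    · -- fresh key appends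
      have hcf : acc.contains k0 = false := by
        cases h : acc.contains k0
        · rfl
        · exact absurd h hc
      have hgacc : acc.getD k0 0 = 0 := PySem.Dict.getD_of_not_contains _ _ hcf
      have hka' : (acc.insert k0 (acc.getD k0 0 + v0)).keys.Nodup :=
        PySem.Dict.nodup_keys_insert _ _ _ hka
      have hmap : (acc.items.map (fun kv => (kv.1, kv.2 + (PySem.Dict.mk t).getD kv.1 0)))
          = acc.items.map (fun kv => (kv.1, kv.2 + (PySem.Dict.mk ((k0, v0) :: t)).getD kv.1 0)) := by
        apply List.map_congr_left
        intro q hq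
        have hqk : q.1 ≠ k0 := by
          intro he
          have hmem : q.1 ∈ acc.keys := PySem.Dict.mem_keys_of_mem_items _ hq
          rw [← PySem.Dict.contains_iff_mem_keys] at hmem
          rw [he] at hmem
          rw [hmem] at hcf; cases hcf
        rw [hTne q.1 hqk]
      have hfilter : t.filter (fun kv => ¬ (acc.insert k0 (acc.getD k0 0 + v0)).contains kv.1 = true)
          = t.filter (fun kv => ¬ acc.contains kv.1 = true) := by
        apply List.filter_congr
        intro kv hkv
        have hne : (kv.1 == k0) = false := by
          simp only [beq_eq_false_iff_ne, ne_eq]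
          intro he; exact hnd.1 (he ▸ List.mem_map_of_mem hkv)
        simp [PySem.Dict.contains_insert, hne]
      rw [ih _ hnd.2 hka', PySem.Dict.items_insert_of_not_contains _ _ hcf]
      have hkeep : (decide (¬ acc.contains k0 = true)) = true := by simp [hcf]
      rw [hkeep]
      simp only [if_pos, List.map_append, List.map_cons, List.map_nil,
        List.append_assoc]
      rw [hmap, hfilter]
      simp [hgacc, hTp']

-- ===== VERDICT (by name: the statement is the Claim_ definition above) =====
theorem reconcile_positions_3_spec : Claim_equal_reconcile_positions_3 := by
  intro d1 d2 _ hpre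
  obtain ⟨hnd1, hnd2⟩ := hpre
  unfold Spec_reconcile_positions_3 reconcile_positions_3 reconcile_positions_3_alt
  simp only [gsv_eq, List.foldl_append]
  have hkeys1 : (PySem.Dict.mk d1).keys = d1.map (fun x => x.1) := rfl
  have hkeys2 : (PySem.Dict.mk d2).keys = d2.map (fun x => x.1) := rfl
  rw [hkeys1, hkeys2, List.foldl_map, List.foldl_map]
  -- getD on a member of a Nodup assoc list is its value
  have hg1 : ∀ kv ∈ d1, (PySem.Dict.mk d1).getD kv.1 0 = kv.2 := by
    intro kv hkv; simp [PySem.Dict.getD, get?_mk_of_mem hnd1 hkv]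
  have hg2 : ∀ kv ∈ d2, (PySem.Dict.mk d2).getD kv.1 0 = kv.2 := by
    intro kv hkv; simp [PySem.Dict.getD, get?_mk_of_mem hnd2 hkv]
  -- A's first pass, rewritten to read dict 1's value off the traversed pair
  have h1 : d1.foldl (fun res kv =>
        if (PySem.Dict.mk d2).getD kv.1 0 - (PySem.Dict.mk d1).getD kv.1 0 ≠ 0
        then res.insert kv.1 ((PySem.Dict.mk d2).getD kv.1 0 - (PySem.Dict.mk d1).getD kv.1 0)
        else res) PySem.Dict.empty
      = d1.foldl (fun res kv =>
        if (PySem.Dict.mk d2).getD kv.1 0 - kv.2 ≠ 0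
        then res.insert kv.1 ((PySem.Dict.mk d2).getD kv.1 0 - kv.2) else res) PySem.Dict.empty := by
    apply PySem.List.foldl_congr_mem
    intro acc kv hkv
    rw [hg1 kv hkv]
  rw [h1]
  -- A's second pass, rewritten to read dict 2's value off the traversed pair
  have h2 : d2.foldl (fun res kv =>
        if (PySem.Dict.mk d2).getD kv.1 0 - (PySem.Dict.mk d1).getD kv.1 0 ≠ 0
        then res.insert kv.1 ((PySem.Dict.mk d2).getD kv.1 0 - (PySem.Dict.mk d1).getD kv.1 0)
        else res)
        (d1.foldl (fun res kv =>
          if (PySem.Dict.mk d2).getD kv.1 0 - kv.2 ≠ 0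
          then res.insert kv.1 ((PySem.Dict.mk d2).getD kv.1 0 - kv.2) else res) PySem.Dict.empty)
      = d2.foldl (fun res kv =>
        if kv.2 - (PySem.Dict.mk d1).getD kv.1 0 ≠ 0
        then res.insert kv.1 (kv.2 - (PySem.Dict.mk d1).getD kv.1 0) else res)
        (d1.foldl (fun res kv =>
          if (PySem.Dict.mk d2).getD kv.1 0 - kv.2 ≠ 0
          then res.insert kv.1 ((PySem.Dict.mk d2).getD kv.1 0 - kv.2) else res) PySem.Dict.empty) := by
    apply PySem.List.foldl_congr_mem
    intro acc kv hkv
    rw [hg2 kv hkv]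
  rw [h2]
  -- A's first accumulator: the filtered difference lines of dict 1
  have hitemsA1 : (d1.foldl (fun res kv =>
        if (PySem.Dict.mk d2).getD kv.1 0 - kv.2 ≠ 0
        then res.insert kv.1 ((PySem.Dict.mk d2).getD kv.1 0 - kv.2) else res)
        (PySem.Dict.empty : PySem.Dict String Int)).items
      = (d1.map (fun kv => (kv.1, (PySem.Dict.mk d2).getD kv.1 0 - kv.2))).filter
          (fun kv => kv.2 ≠ 0) := by
    have := foldl_ins_if_fresh d1 (fun kv => (PySem.Dict.mk d2).getD kv.1 0 - kv.2)
      PySem.Dict.empty hnd1 (by intro kv _; exact PySem.Dict.contains_empty kv.1)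
    simpa [PySem.Dict.empty] using this
  have hmapfst : (d1.map (fun kv => (kv.1, (PySem.Dict.mk d2).getD kv.1 0 - kv.2))).map Prod.fst
      = d1.map Prod.fst := by simp [List.map_map, Function.comp]
  have hkaA1 : (d1.foldl (fun res kv =>
        if (PySem.Dict.mk d2).getD kv.1 0 - kv.2 ≠ 0
        then res.insert kv.1 ((PySem.Dict.mk d2).getD kv.1 0 - kv.2) else res)
        (PySem.Dict.empty : PySem.Dict String Int)).keys.Nodup := by
    simp only [PySem.Dict.keys, hitemsA1]
    refine List.Nodup.sublist (List.Sublist.map _ List.filter_sublist) ?_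
    rw [hmapfst]; exact hnd1
  have hsubkeys : ∀ k : String, k ∈ (d1.foldl (fun res kv =>
        if (PySem.Dict.mk d2).getD kv.1 0 - kv.2 ≠ 0
        then res.insert kv.1 ((PySem.Dict.mk d2).getD kv.1 0 - kv.2) else res)
        (PySem.Dict.empty : PySem.Dict String Int)).keys → k ∈ d1.map Prod.fst := by
    intro k hk
    simp only [PySem.Dict.keys, hitemsA1] at hk
    rw [← hmapfst]
    exact (List.Sublist.map Prod.fst List.filter_sublist).mem hk
  rw [Aphase2_items d1 d2 _ hnd2 hkaA1 ?hinv ?hout]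
  case hinv =>
    intro kv hkv w hw hdw
    apply PySem.Dict.get?_of_mem_items
    · rw [hitemsA1]
      apply List.mem_filter.mpr
      constructor
      · have : ((kv.1, w) : String × Int) ∈ d1 := mem_of_get?_mk hw
        have := List.mem_map_of_mem (f := fun kv => ((kv.1 : String), (PySem.Dict.mk d2).getD kv.1 0 - kv.2)) this
        simpa [hg2 kv hkv] using this
      · simpa using hdw
    · exact hkaA1
  case hout =>
    intro kv hkv hkvf
    cases hb : (d1.foldl (fun res kv =>
        if (PySem.Dict.mk d2).getD kv.1 0 - kv.2 ≠ 0
        then res.insert kv.1 ((PySem.Dict.mk d2).getD kv.1 0 - kv.2) else res)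
        (PySem.Dict.empty : PySem.Dict String Int)).contains kv.1 with
    | false => rfl
    | true =>
      exfalso
      have hk := hsubkeys kv.1 ((PySem.Dict.contains_iff_mem_keys _ _).mp hb)
      have : (PySem.Dict.mk d1).contains kv.1 = true := by
        rw [PySem.Dict.contains_iff_mem_keys, hkeys1]
        simpa using hk
      rw [this] at hkvf; cases hkvf
  rw [hitemsA1]
  -- B's first accumulator: dict 1 negated, key order preserved
  have hitemsB1 : (d1.foldl (fun acc kv => acc.insert kv.1 (-kv.2))
        (PySem.Dict.empty : PySem.Dict String Int)).items
      = d1.map (fun kv => (kv.1, -kv.2)) := by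
    have := PySem.Dict.items_foldl_insert_fresh (l := d1) (k := Prod.fst) (v := fun kv => -kv.2)
      (d := PySem.Dict.empty) (by intro kv _; exact PySem.Dict.contains_empty kv.1) hnd1
    simpa [PySem.Dict.empty] using this
  have hkaB1 : (d1.foldl (fun acc kv => acc.insert kv.1 (-kv.2))
        (PySem.Dict.empty : PySem.Dict String Int)).keys.Nodup := by
    simp only [PySem.Dict.keys, hitemsB1, List.map_map]
    simpa [Function.comp] using hnd1
  have hcB1 : ∀ k : String, (d1.foldl (fun acc kv => acc.insert kv.1 (-kv.2))
        (PySem.Dict.empty : PySem.Dict String Int)).contains k = (PySem.Dict.mk d1).contains k := by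
    intro k
    rw [PySem.Dict.contains_eq_decide_mem_keys, PySem.Dict.contains_eq_decide_mem_keys]
    simp [PySem.Dict.keys, hitemsB1, List.map_map, Function.comp]
  rw [Bphase2_items d2 _ hnd2 hkaB1, hitemsB1]
  rw [List.filter_append]
  congr 1
  · -- the dict-1 lines: -v + getD2 = getD2 - v
    rw [List.map_map]
    congr 1
    apply List.map_congr_left
    intro kv _
    simp [Function.comp, neg_add_eq_sub]
  · -- the dict-2-only lines
    have hid : (List.map (fun kv => ((kv.1 : String), (kv.2 : Int)))
        (d2.filter (fun kv => ¬ (d1.foldl (fun acc kv => acc.insert kv.1 (-kv.2))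
          (PySem.Dict.empty : PySem.Dict String Int)).contains kv.1 = true)))
        = d2.filter (fun kv => ¬ (d1.foldl (fun acc kv => acc.insert kv.1 (-kv.2))
          (PySem.Dict.empty : PySem.Dict String Int)).contains kv.1 = true) := by
      simp
    rw [hid, List.filter_filter]
    apply List.filter_congr
    intro kv _
    rw [hcB1 kv.1]
    simp [Bool.and_comm]
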